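/- GENERATED by c/gen_decode.py: decode facts of the image, one per distinct instruction byte string. -/
import UserX.DecodeImage

#decode_all Vorbis.Dec
  "0f28d7"  -- movaps xmm2,xmm7
  "0f8467ffffff"  -- je 110e5b
  "0f850d050000"  -- jne 115ef3
  "0f88c3000000"  -- js 10e45b
  "0f8f93fcffff"  -- jg 10500a
  "0fb6d2"  -- movzx edx,dl
  "39c6"  -- cmp esi,eax
  "410fb6442408"  -- movzx eax,BYTE PTR [r12+0x8]
  "415e"  -- pop r14
  "41891f"  -- mov DWORD PTR [r15],ebx
  "418b7604"  -- mov esi,DWORD PTR [r14+0x4]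
  "41c785e806000000000000"  -- mov DWORD PTR [r13+0x6e8],0x0
  "440faf7504"  -- imul r14d,DWORD PTR [rbp+0x4]
  "4439ed"  -- cmp ebp,r13d
  "4489742404"  -- mov DWORD PTR [rsp+0x4],r14d
  "4489fd"  -- mov ebp,r15d
  "448bad98000000"  -- mov r13d,DWORD PTR [rbp+0x98]
  "4539f7"  -- cmp r15d,r14d
  "458b6604"  -- mov r12d,DWORD PTR [r14+0x4]
  "48035d18"  -- add rbx,QWORD PTR [rbp+0x18]
  "48639580000000"  -- movsxd rdx,DWORD PTR [rbp+0x80]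
  "4883bbd801000000"  -- cmp QWORD PTR [rbx+0x1d8],0x0
  "4889442438"  -- mov QWORD PTR [rsp+0x38],rax
  "4889ef"  -- mov rdi,rbp
  "488b75c0"  -- mov rsi,QWORD PTR [rbp-0x40]
  "488d3c28"  -- lea rdi,[rax+rbp*1]
  "488d7b70"  -- lea rdi,[rbx+0x70]
  "488d98b2000000"  -- lea rbx,[rax+0xb2]
  "488dbc2cc0000000"  -- lea rdi,[rsp+rbp*1+0xc0]
  "48c1e302"  -- shl rbx,0x2
  "4901df"  -- add r15,rbx
  "49833c2400"  -- cmp QWORD PTR [r12],0x0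
  "498b742410"  -- mov rsi,QWORD PTR [r12+0x10]
  "498d7e14"  -- lea rdi,[r14+0x14]
  "49c1e903"  -- shr r9,0x3
  "4a8dbcf368040000"  -- lea rdi,[rbx+r14*8+0x468]
  "4c63e3"  -- movsxd r12,ebx
  "4c89f7"  -- mov rdi,r14
  "4c8d2496"  -- lea r12,[rsi+rdx*4]
  "4d39e6"  -- cmp r14,r12
  "4d8d7c247c"  -- lea r15,[r12+0x7c]
  "660f2fd0"  -- comisd xmm2,xmm0
  "66410f7ede"  -- movd r14d,xmm3
  "7203"  -- jb 10baff
  "743e"  -- je 10805e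
  "7530"  -- jne 112de9
  "796b"  -- jns 10e44f
  "7e4f"  -- jle 108eae
  "80bc24a100000069"  -- cmp BYTE PTR [rsp+0xa1],0x69
  "83c01e"  -- add eax,0x1e
  "89442410"  -- mov DWORD PTR [rsp+0x10],eax
  "898548ffffff"  -- mov DWORD PTR [rbp-0xb8],eax
  "8b3b"  -- mov edi,DWORD PTR [rbx]
  "8b742404"  -- mov esi,DWORD PTR [rsp+0x4]
  "8d148500000000"  -- lea edx,[rax*4+0x0]
  "bbffffffff"  -- mov ebx,0xffffffff
  "c60300"  -- mov BYTE PTR [rbx],0x0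
  "c7833806000002000000"  -- mov DWORD PTR [rbx+0x638],0x2
  "e802fbffff"  -- call 107500
  "e80cedfeff"  -- call 100640
  "e81735ffff"  -- call 100720
  "e81f8affff"  -- call 10d1c0
  "e82a17ffff"  -- call 100800
  "e832c6ffff"  -- call 105f00
  "e83db9feff"  -- call 100640
  "e84871ffff"  -- call 100640
  "e8531bffff"  -- call 100640
  "e85f24ffff"  -- call 100800
  "e86bf0feff"  -- call 100640
  "e8770effff"  -- call 100480
  "e881defeff"  -- call 103d00
  "e88da6feff"  -- call 100300
  "e896aefeff"  -- call 100640
  "e8a0d0ffff"  -- call 100640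
  "e8abb7feff"  -- call 1003c0
  "e8b496ffff"  -- call 100640
  "e8bef0ffff"  -- call 100300
  "e8c91fffff"  -- call 100300
  "e8d318ffff"  -- call 100640
  "e8ddd6feff"  -- call 103d00
  "e8e769ffff"  -- call 100640
  "e8eebfffff"  -- call 104320
  "e8f9f6feff"  -- call 100640
  "e91f010000"  -- jmp 10bda1
  "e966ffffff"  -- jmp 113b22
  "e9bbf6ffff"  -- jmp 113b22
  "eb0d"  -- jmp 10c345
  "eba3"  -- jmp 108b5e
  "f20f100538db0100"  -- movsd xmm0,QWORD PTR [rip+0x1db38]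
  "f20f5905b2430100"  -- mulsd xmm0,QWORD PTR [rip+0x143b2]
  "f20f5e442428"  -- divsd xmm0,QWORD PTR [rsp+0x28]
  "f30f105c2410"  -- movss xmm3,DWORD PTR [rsp+0x10]
  "f30f110b"  -- movss DWORD PTR [rbx],xmm1
  "f30f115c240c"  -- movss DWORD PTR [rsp+0xc],xmm3
  "f30f2acd"  -- cvtsi2ss xmm1,ebp
  "f30f594314"  -- mulss xmm0,DWORD PTR [rbx+0x14]
  "f30f5cc1"  -- subss xmm0,xmm1
  "f3410f107508"  -- movss xmm6,DWORD PTR [r13+0x8]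
  "f7f3"  -- div ebx
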